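-- pv_equiv track=rewrite | github.com/amcgavin/advent-of-code | 2023/python/13.py | find_mirror_x
-- ===== SOURCE A (Python) =====
-- def find_mirror_x(grid, data, expected=0):
--     for x in range(len(data[0]) - 1):
--         total = 0
--         for i in range(0, (x + 1)):
--             total += sum(
--                 1
--                 if grid.get((x - i, y), grid.get((x + i + 1, y)))
--                 != grid.get((x + i + 1, y), grid.get((x - i, y)))
--                 else 0
--                 for y in range(len(data))
--             )
--
--         if total == expected:
--             return x + 1
--     return 0
-- ===== SOURCE B (Python) =====
-- def find_mirror_x(grid, data, expected=0):
--     h = len(data)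
--     w = len(data[0])
--     totals = [0] * max(w - 1, 0)
--     for l in range(w - 1):
--         for r in range(l + 1, 2 * w - 2 - l, 2):
--             m = 0
--             for y in range(h):
--                 a = grid.get((l, y))
--                 b = grid.get((r, y))
--                 if a is not None and b is not None and a != b:
--                     m += 1
--             totals[(l + r) // 2] += m
--     for x in range(len(totals)):
--         if totals[x] == expected:
--             return x + 1
--     return 0
-- ===== Notes on version B (the rewrite author's own statement) =====
-- stated objective: alternative
-- what changed: B inverts the iteration: instead of A's per-split expansion recomputing mismatches for every candidate mirror (with early return), B makes one staged pass over all mirrored column pairs (l,r) with l+r odd, scattering each pair's mismatch count into a totals bucket indexed by the split point (l+r)//2, then scans the finished totals table for the first split equal to expected.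
import Mathlib
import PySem

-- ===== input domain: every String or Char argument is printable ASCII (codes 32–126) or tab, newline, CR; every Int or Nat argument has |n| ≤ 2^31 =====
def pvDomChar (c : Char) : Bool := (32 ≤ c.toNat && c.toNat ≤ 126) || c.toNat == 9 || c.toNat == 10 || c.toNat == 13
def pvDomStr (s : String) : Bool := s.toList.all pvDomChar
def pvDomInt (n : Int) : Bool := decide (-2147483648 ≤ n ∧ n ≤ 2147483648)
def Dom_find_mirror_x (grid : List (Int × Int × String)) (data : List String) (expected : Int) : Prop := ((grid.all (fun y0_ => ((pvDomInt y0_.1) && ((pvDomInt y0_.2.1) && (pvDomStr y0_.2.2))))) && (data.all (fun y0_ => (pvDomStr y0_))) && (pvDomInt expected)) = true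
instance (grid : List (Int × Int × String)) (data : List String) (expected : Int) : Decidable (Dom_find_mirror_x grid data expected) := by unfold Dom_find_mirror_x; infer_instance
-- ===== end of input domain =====

-- B inverts the iteration order: one staged pass over mirrored column pairs scattered into a
-- totals table indexed by split point, then a scan of that table — instead of A's per-split
-- recomputation with early return (objective: alternative; same asymptotic cost).

-- shared helper: grid.get((a, b)) — first-match lookup in the association list (Python dict lookup)
def pvLookup (grid : List (Int × Int × String)) (a b : Int) : Option String :=
  (grid.find? (fun e => e.1 == a && e.2.1 == b)).map (fun e => e.2.2)

-- ===== PORT A =====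
-- outer 'for x in range(len(data[0]) - 1)' with early return; total = Σ_i Σ_y indicator
def pvLoopA (grid : List (Int × Int × String)) (dlen expected : Int) : List Int → Int
  | [] => 0
  | x :: rest =>
    if ((PySem.List.pyRange 0 (x + 1) 1).map (fun i =>
        ((PySem.List.pyRange 0 dlen 1).map (fun y =>
          if ((pvLookup grid (x - i) y).or (pvLookup grid (x + i + 1) y)) ≠
             ((pvLookup grid (x + i + 1) y).or (pvLookup grid (x - i) y)) then (1 : Int) else 0)).sum)).sum = expected
    then x + 1 else pvLoopA grid dlen expected rest

def find_mirror_x (grid : List (Int × Int × String)) (data : List String) (expected : Int) : Int :=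
  -- data[0] raises IndexError on empty data: excluded by Pre_; the default is never used there
  pvLoopA grid (data.length : Int) expected
    (PySem.List.pyRange 0 (PySem.Str.len (PySem.List.pyGetD data 0 "") - 1) 1)

-- ===== PORT B =====
-- inner 'for y in range(h)' accumulator: m += 1 when both cells are present and differ
def pvMismatch (grid : List (Int × Int × String)) (h l r : Int) : Int :=
  (PySem.List.pyRange 0 h 1).foldl (fun m y =>
    let a := pvLookup grid l y
    let b := pvLookup grid r y
    if a ≠ none ∧ b ≠ none ∧ a ≠ b then m + 1 else m) 0

-- totals[i] += v; the index is always a nonnegative in-range Int here, where List.set is exact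
def pvAddAt (ts : List Int) (i : Int) (v : Int) : List Int :=
  ts.set i.toNat (PySem.List.pyGetD ts i 0 + v)

-- the staged scatter pass: for l in range(w-1): for r in range(l+1, 2*w-2-l, 2): totals[(l+r)//2] += m
def pvTotals (grid : List (Int × Int × String)) (h w : Int) : List Int :=
  (PySem.List.pyRange 0 (w - 1) 1).foldl (fun ts l =>
    (PySem.List.pyRange (l + 1) (2 * w - 2 - l) 2).foldl (fun ts r =>
      pvAddAt ts (PySem.Int.floordiv (l + r) 2) (pvMismatch grid h l r)) ts)
    (List.replicate (max (w - 1) 0).toNat (0 : Int))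

-- final scan: for x in range(len(totals)): if totals[x] == expected: return x + 1
def pvScanB (totals : List Int) (expected : Int) : List Int → Int
  | [] => 0
  | x :: rest =>
    if PySem.List.pyGetD totals x 0 = expected then x + 1 else pvScanB totals expected rest

def find_mirror_x_alt (grid : List (Int × Int × String)) (data : List String) (expected : Int) : Int :=
  let h : Int := (data.length : Int)
  let w : Int := PySem.Str.len (PySem.List.pyGetD data 0 "")  -- data[0]: Pre_ excludes empty data
  let totals := pvTotals grid h w
  pvScanB totals expected (PySem.List.pyRange 0 (totals.length : Int) 1)

-- ===== PRECONDITION & SPEC =====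
-- Pre_ excludes only empty data, on which A raises IndexError at data[0]
def Pre_find_mirror_x (grid : List (Int × Int × String)) (data : List String) (expected : Int) : Prop :=
  data ≠ []
instance (grid : List (Int × Int × String)) (data : List String) (expected : Int) : Decidable (Pre_find_mirror_x grid data expected) := by unfold Pre_find_mirror_x; infer_instance

def pvWitness_find_mirror_x : (List (Int × Int × String)) × List String × Int :=
  ([(0, 0, "a"), (1, 0, "a")], ["aa"], 0)

def Spec_find_mirror_x (grid : List (Int × Int × String)) (data : List String) (expected : Int) (out : Int) : Prop := out = find_mirror_x_alt grid data expected
instance (grid : List (Int × Int × String)) (data : List String) (expected : Int) (out : Int) : Decidable (Spec_find_mirror_x grid data expected out) := by unfold Spec_find_mirror_x; infer_instance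

-- ===== CLAIM (what is proved, stated in full; the proofs are below) =====
def Claim_equal_find_mirror_x : Prop := ∀ (grid : List (Int × Int × String)) (data : List String) (expected : Int), Dom_find_mirror_x grid data expected → Pre_find_mirror_x grid data expected → Spec_find_mirror_x grid data expected (find_mirror_x grid data expected)

-- ===== LEMMAS AND PROOFS =====

-- per-cell: A's double-get-with-default comparison fires iff both cells are present and differ
lemma pv_cell (a b : Option String) :
    (if a.or b ≠ b.or a then (1 : Int) else 0) =
    (if a ≠ none ∧ b ≠ none ∧ a ≠ b then (1 : Int) else 0) := by
  cases a <;> cases b <;> simp [Option.or]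

-- A's inner y-sum for the pair (l, r) is B's accumulator count pvMismatch
lemma pv_inner_A (grid : List (Int × Int × String)) (h l r : Int) :
    ((PySem.List.pyRange 0 h 1).map (fun y =>
      if ((pvLookup grid l y).or (pvLookup grid r y)) ≠
         ((pvLookup grid r y).or (pvLookup grid l y)) then (1 : Int) else 0)).sum =
    pvMismatch grid h l r := by
  unfold pvMismatch
  have hstep : ∀ (m : Int) (y : Int),
      (if pvLookup grid l y ≠ none ∧ pvLookup grid r y ≠ none ∧
          pvLookup grid l y ≠ pvLookup grid r y then m + 1 else m) =
      m + (if pvLookup grid l y ≠ none ∧ pvLookup grid r y ≠ none ∧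
          pvLookup grid l y ≠ pvLookup grid r y then (1 : Int) else 0) := by
    intro m y; split <;> ring
  simp only [hstep]
  rw [PySem.List.foldl_add, zero_add]
  congr 1
  apply List.map_congr_left
  intro y _
  exact pv_cell (pvLookup grid l y) (pvLookup grid r y)

-- pvAddAt at an in-range Nat index: pointwise description, length preserved
lemma pv_addAt_length (ts : List Int) (i v : Int) : (pvAddAt ts i v).length = ts.length := by
  simp [pvAddAt]

lemma pv_addAt_getD (ts : List Int) (i : Nat) (hi : i < ts.length) (v : Int) (x : Nat) :
    (pvAddAt ts (i : Int) v).getD x 0 =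
    if x = i then ts.getD x 0 + v else ts.getD x 0 := by
  unfold pvAddAt
  rw [PySem.List.pyGetD_eq_getElem ts 0 (by positivity) (by exact_mod_cast hi)]
  simp only [Int.toNat_natCast]
  by_cases hx : x = i
  · subst hx
    simp [List.getD_eq_getElem?_getD, List.getElem?_set, hi]
  · have hne : i ≠ x := fun hxi => hx hxi.symm
    rw [List.getD_eq_getElem?_getD, List.getD_eq_getElem?_getD, List.getElem?_set, if_neg hne, if_neg hx]

-- any fold of pvAddAt steps preserves the length
lemma pv_foldl_addAt_length {β : Type} (g f : β → Int) :
    ∀ (bs : List β) (ts : List Int),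
      (bs.foldl (fun ts b => pvAddAt ts (g b) (f b)) ts).length = ts.length := by
  intro bs
  induction bs with
  | nil => intro ts; rfl
  | cons b rest ih => intro ts; rw [List.foldl_cons, ih, pv_addAt_length]

-- scatter over consecutive indices l, l+1, …, l+n-1: pointwise description of the result
lemma pv_scatter_getD (v : Nat → Int) (l : Nat) :
    ∀ (n : Nat) (ts : List Int), l + n ≤ ts.length → ∀ (x : Nat),
      (((List.range n).foldl (fun ts k => pvAddAt ts ((l + k : Nat) : Int) (v k)) ts)).getD x 0 =
      ts.getD x 0 + (if l ≤ x ∧ x < l + n then v (x - l) else 0) := by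
  intro n
  induction n with
  | zero => intro ts _ x; simp
  | succ m ih =>
    intro ts hlen x
    rw [List.range_succ, List.foldl_append, List.foldl_cons, List.foldl_nil]
    have hmem : l + m < ((List.range m).foldl
        (fun ts k => pvAddAt ts ((l + k : Nat) : Int) (v k)) ts).length := by
      rw [pv_foldl_addAt_length]; omega
    rw [pv_addAt_getD _ _ hmem]
    rw [ih ts (by omega) x]
    by_cases hx : x = l + m
    · subst hx
      rw [if_pos rfl, if_neg (by omega : ¬ (l ≤ l + m ∧ l + m < l + m)), add_zero,
        if_pos (by omega : l ≤ l + m ∧ l + m < l + (m + 1))]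
      have hvm : l + m - l = m := by omega
      rw [hvm]
    · rw [if_neg hx]
      by_cases h2 : l ≤ x ∧ x < l + m
      · rw [if_pos h2, if_pos (by omega)]
      · rw [if_neg h2, if_neg (by omega)]

-- the port's inner r-loop IS a scatter over consecutive buckets l, l+1, …, w-2
lemma pv_inner_norm (grid : List (Int × Int × String)) (h w : Int) (l : Nat)
    (hl : (l : Int) < w - 1) (ts : List Int) :
    (PySem.List.pyRange ((l : Int) + 1) (2 * w - 2 - l) 2).foldl (fun ts r =>
      pvAddAt ts (PySem.Int.floordiv ((l : Int) + r) 2) (pvMismatch grid h l r)) ts =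
    (List.range (w - 1 - (l : Int)).toNat).foldl (fun ts k =>
      pvAddAt ts ((l + k : Nat) : Int) (pvMismatch grid h l ((l : Int) + 1 + 2 * k))) ts := by
  rw [PySem.List.pyRange_of_pos _ _ (by norm_num)]
  rw [if_pos (by omega)]
  have hcount : ((2 * w - 2 - (l : Int) - ((l : Int) + 1) + 2 - 1) / 2).toNat =
      (w - 1 - (l : Int)).toNat := by omega
  rw [hcount, List.foldl_map]
  apply PySem.List.foldl_congr_mem
  intro ts' k hk
  have hidx : PySem.Int.floordiv ((l : Int) + ((l : Int) + 1 + 2 * (k : Int))) 2 =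
      ((l + k : Nat) : Int) := by
    rw [PySem.Int.floordiv_eq_ediv_of_pos (by norm_num)]
    push_cast
    omega
  rw [hidx]

-- after n outer steps, bucket x holds the partial sum over l < min n (x+1)
lemma pv_outer (grid : List (Int × Int × String)) (h w : Int) (hw : 1 ≤ w) :
    ∀ (n : Nat), (n : Int) ≤ w - 1 → ∀ (x : Nat), (x : Int) < w - 1 →
      (((List.range n).foldl (fun ts (l : Nat) =>
        (PySem.List.pyRange ((l : Int) + 1) (2 * w - 2 - l) 2).foldl (fun ts r =>
          pvAddAt ts (PySem.Int.floordiv ((l : Int) + r) 2) (pvMismatch grid h l r)) ts)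
        (List.replicate (w - 1).toNat (0 : Int)))).getD x 0 =
      ((List.range (min n (x + 1))).map (fun l : Nat =>
        pvMismatch grid h (l : Int) (2 * (x : Int) + 1 - (l : Int)))).sum := by
  intro n
  induction n with
  | zero =>
    intro _ x _
    simp [List.getD_eq_getElem?_getD, List.getElem?_replicate]
    split <;> rfl
  | succ m ih =>
    intro hm x hx
    rw [List.range_succ, List.foldl_append, List.foldl_cons, List.foldl_nil]
    rw [pv_inner_norm grid h w m (by omega)]
    have hlen : m + (w - 1 - (m : Int)).toNat ≤
        (((List.range m).foldl (fun ts (l : Nat) =>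
          (PySem.List.pyRange ((l : Int) + 1) (2 * w - 2 - l) 2).foldl (fun ts r =>
            pvAddAt ts (PySem.Int.floordiv ((l : Int) + r) 2) (pvMismatch grid h l r)) ts)
          (List.replicate (w - 1).toNat (0 : Int)))).length := by
      have : ∀ (bs : List Nat) (ts : List Int),
          (bs.foldl (fun ts (l : Nat) =>
            (PySem.List.pyRange ((l : Int) + 1) (2 * w - 2 - l) 2).foldl (fun ts r =>
              pvAddAt ts (PySem.Int.floordiv ((l : Int) + r) 2) (pvMismatch grid h l r)) ts)
            ts).length = ts.length := by
        intro bs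
        induction bs with
        | nil => intro ts; rfl
        | cons b rest ih2 =>
          intro ts
          rw [List.foldl_cons, ih2, pv_foldl_addAt_length]
      rw [this, List.length_replicate]
      omega
    rw [pv_scatter_getD _ _ _ _ hlen x]
    rw [ih (by omega) x hx]
    by_cases hmx : m ≤ x
    · have hcond : m ≤ x ∧ x < m + (w - 1 - (m : Int)).toNat := by
        constructor
        · exact hmx
        · omega
      rw [if_pos hcond]
      have hmin1 : min m (x + 1) = m := by omega
      have hmin2 : min (m + 1) (x + 1) = m + 1 := by omega
      rw [hmin1, hmin2, List.range_succ, List.map_append, List.sum_append]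
      simp only [List.map_cons, List.map_nil, List.sum_cons, List.sum_nil, add_zero]
      congr 2
      omega
    · rw [if_neg (by omega)]
      have : min (m + 1) (x + 1) = min m (x + 1) := by omega
      rw [this, add_zero]

-- bucket x of the finished totals table equals the full sum over l ≤ x
lemma pv_totals_getD (grid : List (Int × Int × String)) (h w : Int) (hw : 1 ≤ w)
    (x : Nat) (hx : (x : Int) < w - 1) :
    (pvTotals grid h w).getD x 0 =
    ((List.range (x + 1)).map (fun l : Nat =>
      pvMismatch grid h (l : Int) (2 * (x : Int) + 1 - (l : Int)))).sum := by
  unfold pvTotals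
  have hW : w - 1 = (((w - 1).toNat : Nat) : Int) := by omega
  rw [show PySem.List.pyRange 0 (w - 1) 1 = PySem.List.pyRange 0 (((w - 1).toNat : Nat) : Int) 1 from by rw [← hW]]
  rw [PySem.List.pyRange_zero_natCast, List.foldl_map]
  rw [show max (w - 1) 0 = w - 1 from by omega]
  rw [pv_outer grid h w hw (w - 1).toNat (by omega) x hx]
  have hmin : min (w - 1).toNat (x + 1) = x + 1 := by omega
  rw [hmin]

-- A's per-split total, reindexed l = x - i, equals the bucket sum
lemma pv_A_total (grid : List (Int × Int × String)) (h x : Int) (hx0 : 0 ≤ x) :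
    ((PySem.List.pyRange 0 (x + 1) 1).map (fun i =>
      ((PySem.List.pyRange 0 h 1).map (fun y =>
        if ((pvLookup grid (x - i) y).or (pvLookup grid (x + i + 1) y)) ≠
           ((pvLookup grid (x + i + 1) y).or (pvLookup grid (x - i) y)) then (1 : Int) else 0)).sum)).sum =
    ((List.range (x.toNat + 1)).map (fun l : Nat =>
      pvMismatch grid h (l : Int) (2 * x + 1 - (l : Int)))).sum := by
  have hx1 : x + 1 = ((x.toNat + 1 : Nat) : Int) := by omega
  rw [hx1, PySem.List.pyRange_zero_natCast, List.map_map]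
  have hL : ∀ (n : Nat) (f : Nat → Int),
      ((List.range n).map f).sum = ∑ i ∈ Finset.range n, f i := by
    intro n f
    induction n with
    | zero => simp
    | succ m ih => rw [List.range_succ, List.map_append, List.sum_append,
        Finset.sum_range_succ, ih]; simp
  rw [hL, hL]
  rw [← Finset.sum_range_reflect]
  apply Finset.sum_congr rfl
  intro i hi
  have hi' : i < x.toNat + 1 := Finset.mem_range.mp hi
  simp only [Function.comp_apply]
  rw [pv_inner_A]
  congr 1
  · push_cast; omega
  · push_cast; omega

-- the two early-return scans agree on any shared list of split points inside [0, w-1)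
lemma pv_scans (grid : List (Int × Int × String)) (h w expected : Int) (hw : 1 ≤ w) :
    ∀ (xs : List Int), (∀ x ∈ xs, 0 ≤ x ∧ x < w - 1) →
      pvLoopA grid h expected xs = pvScanB (pvTotals grid h w) expected xs := by
  intro xs
  induction xs with
  | nil => intro _; rfl
  | cons x rest ih =>
    intro hmem
    obtain ⟨hx0, hxw⟩ := hmem x List.mem_cons_self
    unfold pvLoopA pvScanB
    have hlenT : (pvTotals grid h w).length = (w - 1).toNat := by
      unfold pvTotals
      rw [PySem.List.pyRange_one]
      rw [List.foldl_map]
      have : ∀ (bs : List Nat) (ts : List Int),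
          (bs.foldl (fun ts (k : Nat) =>
            (PySem.List.pyRange ((0 : Int) + k + 1) (2 * w - 2 - ((0 : Int) + k)) 2).foldl (fun ts r =>
              pvAddAt ts (PySem.Int.floordiv ((0 : Int) + k + r) 2) (pvMismatch grid h ((0 : Int) + k) r)) ts)
            ts).length = ts.length := by
        intro bs
        induction bs with
        | nil => intro ts; rfl
        | cons b rest2 ih2 =>
          intro ts
          rw [List.foldl_cons, ih2, pv_foldl_addAt_length]
      rw [this, List.length_replicate]
      omega
    have hget : PySem.List.pyGetD (pvTotals grid h w) x 0 =
        (pvTotals grid h w).getD x.toNat 0 := by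
      rw [PySem.List.pyGetD_eq_getElem _ _ hx0 (by rw [hlenT]; omega)]
      rw [List.getD_eq_getElem _ _ (by rw [hlenT]; omega)]
    rw [hget, pv_totals_getD grid h w hw x.toNat (by omega)]
    rw [show (2 : Int) * ((x.toNat : Nat) : Int) + 1 = 2 * x + 1 from by omega]
    rw [pv_A_total grid h x hx0]
    split
    · rfl
    · exact ih (fun y hy => hmem y (List.mem_cons_of_mem _ hy))

-- ===== VERDICT (by name: the statement is the Claim_ definition above) =====
theorem find_mirror_x_spec : Claim_equal_find_mirror_x := by
  intro grid data expected _ _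
  show find_mirror_x grid data expected = find_mirror_x_alt grid data expected
  unfold find_mirror_x find_mirror_x_alt
  set h : Int := (data.length : Int) with hh
  set w : Int := PySem.Str.len (PySem.List.pyGetD data 0 "") with hwdef
  show pvLoopA grid h expected (PySem.List.pyRange 0 (w - 1) 1) =
    pvScanB (pvTotals grid h w) expected
      (PySem.List.pyRange 0 (((pvTotals grid h w).length : Nat) : Int) 1)
  have hw0 : 0 ≤ w := by
    rw [hwdef]; unfold PySem.Str.len; positivity
  by_cases hw : 1 ≤ w
  · have hlenT : ((pvTotals grid h w).length : Int) = w - 1 := by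
      have : (pvTotals grid h w).length = (w - 1).toNat := by
        unfold pvTotals
        rw [PySem.List.pyRange_one, List.foldl_map]
        have hstep : ∀ (bs : List Nat) (ts : List Int),
            (bs.foldl (fun ts (k : Nat) =>
              (PySem.List.pyRange ((0 : Int) + k + 1) (2 * w - 2 - ((0 : Int) + k)) 2).foldl (fun ts r =>
                pvAddAt ts (PySem.Int.floordiv ((0 : Int) + k + r) 2) (pvMismatch grid h ((0 : Int) + k) r)) ts)
              ts).length = ts.length := by
          intro bs
          induction bs with
          | nil => intro ts; rfl
          | cons b rest2 ih2 =>
            intro ts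
            rw [List.foldl_cons, ih2, pv_foldl_addAt_length]
        rw [hstep, List.length_replicate]
        omega
      rw [this]; omega
    rw [hlenT]
    exact pv_scans grid h w expected hw _ (fun x hx => by
      have := (PySem.List.mem_pyRange_one).mp hx
      exact ⟨this.1, this.2⟩)
  · have hw1 : w = 0 ∨ w = 1 := by omega
    have hA : PySem.List.pyRange 0 (w - 1) 1 = [] :=
      PySem.List.pyRange_one_eq_nil (by omega)
    have hB : PySem.List.pyRange 0 ((pvTotals grid h w).length : Int) 1 = [] := by
      have : (pvTotals grid h w).length = 0 := by
        unfold pvTotals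
        rw [PySem.List.pyRange_one_eq_nil (by omega), List.foldl_nil, List.length_replicate]
        omega
      rw [this]
      exact PySem.List.pyRange_one_eq_nil (by norm_num)
    rw [hA, hB]
    rfl
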